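-- pv_equiv track=rewrite | github.com/wan-nan/802.11b-frame-decoding | data scrambler.py | scrambler
-- ===== SOURCE A (Python) =====
-- def scrambler(input_bits):
--     # 初始化寄存器为全0
--     registers = [0, 0, 0, 0, 0, 0, 0]
--
--     # 输出序列
--     output_bits = []
--
--     for bit in input_bits:
--         # 计算输出
--         output = (bit + registers[6] + registers[3]) % 2
--         output_bits.append(output)
--
--         # 更新寄存器
--         registers = [output] + registers[:-1]
--
--     return output_bits
-- ===== SOURCE B (Python) =====
-- def scrambler(input_bits):
--     # Different algorithm: the scrambler is a linear (GF(2)) filter with transfer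
--     # function 1/(1 + x^4 + x^7), so the output is the convolution of the input
--     # (taken mod 2) with the filter's impulse response h, reduced mod 2.
--     n = len(input_bits)
--     # impulse response: response to a single 1 followed by zeros
--     h = []
--     for i in range(n):
--         h.append(1 if i == 0 else ((h[i - 4] if i >= 4 else 0) + (h[i - 7] if i >= 7 else 0)) % 2)
--     # superposition: convolve the mod-2 input with h
--     return [sum(h[k] * (input_bits[i - k] % 2) for k in range(i + 1)) % 2 for i in range(n)]
-- ===== Notes on version B (the rewrite author's own statement) =====
-- stated objective: alternative
-- what changed: Replaced the sequential feedback shift register by a linear-filter view: B first computes the impulse response h of 1/(1+x^4+x^7) over GF(2) and then produces each output bit as the mod-2 convolution (superposition) of the mod-2 input with h, with no feedback state threaded through the output loop.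
import Mathlib
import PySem

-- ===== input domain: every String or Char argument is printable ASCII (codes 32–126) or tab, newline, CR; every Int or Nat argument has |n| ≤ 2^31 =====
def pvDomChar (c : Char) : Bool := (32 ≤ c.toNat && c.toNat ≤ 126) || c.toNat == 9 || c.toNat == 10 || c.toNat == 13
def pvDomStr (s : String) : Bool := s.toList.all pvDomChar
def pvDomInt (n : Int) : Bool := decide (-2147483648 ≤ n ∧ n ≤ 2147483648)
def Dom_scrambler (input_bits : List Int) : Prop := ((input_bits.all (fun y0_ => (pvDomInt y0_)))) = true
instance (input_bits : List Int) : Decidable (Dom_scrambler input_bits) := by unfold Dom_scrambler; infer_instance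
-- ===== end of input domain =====

-- B replaces the feedback shift register by a linear-filter view: impulse response of 1/(1+x^4+x^7) over GF(2), then mod-2 convolution (objective: alternative algorithm).


-- ===== PORT A =====
-- loop over input_bits carrying (registers, output_bits); registers[6]/registers[3] are in-range reads of a length-7 list
def scramblerGo (registers : List Int) (acc : List Int) : List Int → List Int
  | [] => acc
  | bit :: rest =>
    let output := PySem.Int.mod (bit + registers.getD 6 0 + registers.getD 3 0) 2
    scramblerGo (output :: registers.dropLast) (acc ++ [output]) rest

def scrambler (input_bits : List Int) : List Int :=
  scramblerGo [0, 0, 0, 0, 0, 0, 0] [] input_bits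

-- ===== PORT B =====
-- Source B: first build the impulse response h by the loop 'for i in range(n): h.append(...)'
def scramblerAltH (n : Nat) : List Int :=
  (List.range n).foldl (fun h i =>
    h ++ [if i = 0 then (1 : Int) else
      PySem.Int.mod ((if 4 ≤ i then h.getD (i - 4) 0 else 0) +
                     (if 7 ≤ i then h.getD (i - 7) 0 else 0)) 2]) []

-- Source B: output[i] = sum(h[k] * (input_bits[i-k] % 2) for k in range(i+1)) % 2
def scrambler_alt (input_bits : List Int) : List Int :=
  let n := input_bits.length
  let h := scramblerAltH n
  (List.range n).map (fun i =>
    PySem.Int.mod ((List.range (i + 1)).foldl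
      (fun s k => s + h.getD k 0 * PySem.Int.mod (input_bits.getD (i - k) 0) 2) 0) 2)

-- ===== PRECONDITION & SPEC =====
def Spec_scrambler (input_bits : List Int) (out : List Int) : Prop := out = scrambler_alt input_bits
instance (input_bits : List Int) (out : List Int) : Decidable (Spec_scrambler input_bits out) := by unfold Spec_scrambler; infer_instance

-- ===== CLAIM (what is proved, stated in full; the proofs are below) =====
def Claim_equal_scrambler : Prop := ∀ (input_bits : List Int), Dom_scrambler input_bits → Spec_scrambler input_bits (scrambler input_bits)

-- ===== LEMMAS AND PROOFS =====

-- ---- Stage 1: A's register loop equals the self-indexing recurrence loop recGo ----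
def recGo (out : List Int) (n : Nat) : List Int → List Int
  | [] => out
  | bit :: rest =>
    let tap7 : Int := if 7 ≤ n then out.getD (n - 7) 0 else 0
    let tap4 : Int := if 4 ≤ n then out.getD (n - 4) 0 else 0
    recGo (out ++ [PySem.Int.mod (bit + tap7 + tap4) 2]) (n + 1) rest

-- the register contents as a function of the output history
def pad (out : List Int) : List Int := (out.reverse ++ [0, 0, 0, 0, 0, 0, 0]).take 7

lemma pad_getD (out : List Int) (k : Nat) (hk : k < 7) :
    (pad out).getD k 0 = if k + 1 ≤ out.length then out.getD (out.length - (k + 1)) 0 else 0 := by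
  unfold pad
  rw [List.getD_eq_getElem?_getD, List.getElem?_take]
  simp only [hk, if_true]
  by_cases h : k < out.length
  · rw [List.getElem?_append_left (by simpa using h), List.getElem?_reverse (by simpa using h)]
    simp only [show k + 1 ≤ out.length from h, if_true]
    rw [List.getD_eq_getElem?_getD]
    have : out.length - 1 - k = out.length - (k + 1) := by omega
    rw [this]
  · rw [List.getElem?_append_right (by simpa using h)]
    have h2 : k - out.length < 7 := by omega
    simp only [List.length_reverse]
    interval_cases h3 : (k - out.length) <;> simp [show ¬ (k + 1 ≤ out.length) from by omega]

lemma pad_step (out : List Int) (o : Int) :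
    pad (out ++ [o]) = o :: (pad out).dropLast := by
  unfold pad
  rw [List.reverse_append]
  simp only [List.reverse_cons, List.reverse_nil, List.nil_append,
    List.cons_append, List.take_succ_cons]
  congr 1
  have hlen : 7 ≤ (out.reverse ++ [(0:Int), 0, 0, 0, 0, 0, 0]).length := by simp
  rcases lt_or_eq_of_le hlen with h | h
  · rw [List.dropLast_take h]
  · rw [List.take_of_length_le (le_of_eq h.symm), List.dropLast_eq_take, ← h]

lemma go_eq (rest out : List Int) :
    scramblerGo (pad out) out rest = recGo out out.length rest := by
  induction rest generalizing out with
  | nil => simp [scramblerGo, recGo]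
  | cons bit rest ih =>
    simp only [scramblerGo, recGo]
    have h6 := pad_getD out 6 (by omega)
    have h3 := pad_getD out 3 (by omega)
    have htap : PySem.Int.mod (bit + (pad out).getD 6 0 + (pad out).getD 3 0) 2
        = PySem.Int.mod (bit + (if 7 ≤ out.length then out.getD (out.length - 7) 0 else 0)
            + (if 4 ≤ out.length then out.getD (out.length - 4) 0 else 0)) 2 := by
      rw [h6, h3]
    rw [htap]
    set o := PySem.Int.mod (bit + (if 7 ≤ out.length then out.getD (out.length - 7) 0 else 0)
            + (if 4 ≤ out.length then out.getD (out.length - 4) 0 else 0)) 2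
    rw [← pad_step out o]
    have := ih (out ++ [o])
    simpa using this

-- ---- Stage 2: the nth output of the recurrence, as a function ----
def Yrec (x : List Int) (n : Nat) : Int :=
  PySem.Int.mod (x.getD n 0 + (if h7 : 7 ≤ n then Yrec x (n - 7) else 0)
                            + (if h4 : 4 ≤ n then Yrec x (n - 4) else 0)) 2
termination_by n
decreasing_by all_goals omega

lemma recGo_eq (x : List Int) (d : Nat) : ∀ n, n ≤ x.length → d = x.length - n →
    recGo ((List.range n).map (Yrec x)) n (x.drop n) = (List.range x.length).map (Yrec x) := by
  induction d with
  | zero =>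
    intro n hn hd
    have : n = x.length := by omega
    subst this
    simp [recGo]
  | succ d ih =>
    intro n hn hd
    have hlt : n < x.length := by omega
    rw [List.drop_eq_getElem_cons hlt]
    simp only [recGo]
    have hget : ∀ k : Nat, k < n → ((List.range n).map (Yrec x)).getD k 0 = Yrec x k := by
      intro k hk; exact PySem.List.getD_map_range _ _ _ _ hk
    have hx : x[n] = x.getD n 0 := by
      rw [List.getD_eq_getElem?_getD, List.getElem?_eq_getElem hlt]; rfl
    have ho : PySem.Int.mod (x[n] + (if 7 ≤ n then ((List.range n).map (Yrec x)).getD (n - 7) 0 else 0)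
          + (if 4 ≤ n then ((List.range n).map (Yrec x)).getD (n - 4) 0 else 0)) 2 = Yrec x n := by
      rw [hx, Yrec]
      by_cases h7 : 7 ≤ n
      · rw [if_pos h7, dif_pos h7, if_pos (by omega : 4 ≤ n), dif_pos (by omega : 4 ≤ n),
          hget _ (by omega), hget _ (by omega)]
      · by_cases h4 : 4 ≤ n
        · rw [if_neg (by omega), dif_neg (by omega), if_pos h4, dif_pos h4, hget _ (by omega)]
        · rw [if_neg (by omega), dif_neg (by omega), if_neg (by omega), dif_neg (by omega)]
    rw [ho]
    have hmap : (List.range n).map (Yrec x) ++ [Yrec x n] = (List.range (n + 1)).map (Yrec x) := by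
      rw [List.range_succ, List.map_append]; rfl
    rw [hmap]
    exact ih (n + 1) (by omega) (by omega)

lemma scrambler_eq_Yrec (x : List Int) :
    scrambler x = (List.range x.length).map (Yrec x) := by
  have h0 := go_eq x []
  have h1 := recGo_eq x x.length 0 (by omega) (by omega)
  simp only [List.drop_zero, List.range_zero, List.map_nil, List.length_nil] at h0 h1
  unfold scrambler
  have hpad : pad [] = [0, 0, 0, 0, 0, 0, 0] := by decide
  rw [← hpad, h0, h1]

-- ---- Stage 3: B's h list is the impulse response function Himp ----
def Himp (n : Nat) : Int :=
  if _h0 : n = 0 then 1 else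
    PySem.Int.mod ((if _h4 : 4 ≤ n then Himp (n - 4) else 0) +
                   (if _h7 : 7 ≤ n then Himp (n - 7) else 0)) 2
termination_by n
decreasing_by all_goals omega

lemma scramblerAltH_eq (n : Nat) : scramblerAltH n = (List.range n).map Himp := by
  induction n with
  | zero => rfl
  | succ n ih =>
    unfold scramblerAltH at *
    rw [List.range_succ, List.foldl_append, ih]
    simp only [List.foldl_cons, List.foldl_nil]
    have hget : ∀ k : Nat, k < n → ((List.range n).map Himp).getD k 0 = Himp k := by
      intro k hk; exact PySem.List.getD_map_range _ _ _ _ hk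
    have he : (if n = 0 then (1 : Int) else
        PySem.Int.mod ((if 4 ≤ n then ((List.range n).map Himp).getD (n - 4) 0 else 0) +
                       (if 7 ≤ n then ((List.range n).map Himp).getD (n - 7) 0 else 0)) 2) = Himp n := by
      rw [Himp]
      by_cases h0 : n = 0
      · simp [h0]
      · rw [if_neg h0, dif_neg h0]
        by_cases h7 : 7 ≤ n
        · rw [if_pos (show 4 ≤ n by omega), dif_pos (show 4 ≤ n by omega), if_pos h7, dif_pos h7,
            hget _ (by omega), hget _ (by omega)]
        · by_cases h4 : 4 ≤ n
          · rw [if_pos h4, dif_pos h4, if_neg h7, dif_neg h7, hget _ (by omega)]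
          · rw [if_neg h4, dif_neg h4, if_neg h7, dif_neg h7]
    rw [he]
    simp

-- ---- Stage 4: everything in ZMod 2 ----
def xh (x : List Int) (j : Nat) : ZMod 2 := ((x.getD j 0 : Int) : ZMod 2)
def Hh (k : Nat) : ZMod 2 := ((Himp k : Int) : ZMod 2)
def Sh (x : List Int) (m : Nat) : ZMod 2 := ∑ j ∈ Finset.range (m + 1), Hh (m - j) * xh x j

lemma cast_mod_two (a : Int) : ((PySem.Int.mod a 2 : Int) : ZMod 2) = (a : ZMod 2) := by
  rw [PySem.Int.mod_eq_emod_of_pos (by norm_num)]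
  exact (CharTwo.intCast_eq_mod a).symm

lemma Hh_rec (n : Nat) : Hh n = (if n = 0 then 1 else 0) + (if 4 ≤ n then Hh (n - 4) else 0)
    + (if 7 ≤ n then Hh (n - 7) else 0) := by
  unfold Hh
  rw [Himp]
  by_cases h0 : n = 0
  · simp [h0]
  · rw [dif_neg h0, cast_mod_two]
    push_cast
    by_cases h7 : 7 ≤ n <;> by_cases h4 : 4 ≤ n <;> simp [h0, h7, h4]

lemma Yh_rec (x : List Int) (n : Nat) :
    ((Yrec x n : Int) : ZMod 2) = xh x n + (if 7 ≤ n then ((Yrec x (n - 7) : Int) : ZMod 2) else 0)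
      + (if 4 ≤ n then ((Yrec x (n - 4) : Int) : ZMod 2) else 0) := by
  rw [Yrec, cast_mod_two]
  push_cast
  by_cases h7 : 7 ≤ n <;> by_cases h4 : 4 ≤ n <;> simp [h7, h4, xh]

lemma Sh_rec (x : List Int) (n : Nat) :
    Sh x n = xh x n + (if 7 ≤ n then Sh x (n - 7) else 0) + (if 4 ≤ n then Sh x (n - 4) else 0) := by
  conv_lhs => rw [Sh]
  have hsplit : ∀ j ∈ Finset.range (n + 1),
      Hh (n - j) * xh x j = (if j = n then xh x j else 0)
        + (if j + 4 ≤ n then Hh ((n - 4) - j) * xh x j else 0)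
        + (if j + 7 ≤ n then Hh ((n - 7) - j) * xh x j else 0) := by
    intro j hj
    have hjn : j ≤ n := by simpa [Nat.lt_succ_iff] using hj
    rw [Hh_rec (n - j)]
    have e0 : (n - j = 0) ↔ (j = n) := by omega
    have e4 : (4 ≤ n - j) ↔ (j + 4 ≤ n) := by omega
    have e7 : (7 ≤ n - j) ↔ (j + 7 ≤ n) := by omega
    have s4 : n - j - 4 = (n - 4) - j := by omega
    have s7 : n - j - 7 = (n - 7) - j := by omega
    simp only [e0, e4, e7, s4, s7]
    by_cases h0 : j = n <;> by_cases h4 : j + 4 ≤ n <;> by_cases h7 : j + 7 ≤ n <;>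
      (simp [h0, h4, h7]; try ring)
  rw [Finset.sum_congr rfl hsplit]
  rw [Finset.sum_add_distrib, Finset.sum_add_distrib]
  have t0 : ∑ j ∈ Finset.range (n + 1), (if j = n then xh x j else 0) = xh x n := by
    rw [Finset.sum_ite_eq' (Finset.range (n + 1)) n (xh x)]
    simp
  have tgen : ∀ c : Nat, c ≤ 7 →
      (∑ j ∈ Finset.range (n + 1), (if j + c ≤ n then Hh ((n - c) - j) * xh x j else 0))
        = (if c ≤ n then Sh x (n - c) else 0) := by
    intro c hc
    by_cases hcn : c ≤ n
    · rw [if_pos hcn]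
      unfold Sh
      rw [← Finset.sum_subset (show Finset.range (n - c + 1) ⊆ Finset.range (n + 1) from
        by intro j hj; rw [Finset.mem_range] at *; omega)]
      · apply Finset.sum_congr rfl
        intro j hj
        have : j + c ≤ n := by
          have := Finset.mem_range.1 hj; omega
        rw [if_pos this]
      · intro j hj hnj
        have h1 := Finset.mem_range.1 hj
        have h2 : ¬ j < n - c + 1 := fun h => hnj (Finset.mem_range.2 h)
        rw [if_neg (by omega)]
    · rw [if_neg hcn]
      apply Finset.sum_eq_zero
      intro j hj
      rw [if_neg (by omega)]
  rw [t0, tgen 4 (by omega), tgen 7 (by omega)]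
  ring

lemma Y_eq_S (x : List Int) (n : Nat) : ((Yrec x n : Int) : ZMod 2) = Sh x n := by
  induction n using Nat.strong_induction_on with
  | _ n ih =>
    rw [Yh_rec, Sh_rec]
    by_cases h7 : 7 ≤ n
    · have e7 := ih (n - 7) (by omega)
      have e4 := ih (n - 4) (by omega)
      simp [h7, show 4 ≤ n by omega, e7, e4]
    · by_cases h4 : 4 ≤ n
      · have e4 := ih (n - 4) (by omega)
        simp [h7, h4, e4]
      · simp [h7, h4]

-- two {0,1}-valued integers with the same image in ZMod 2 are equal
lemma eq_of_cast_eq (a b : Int) (ha : a = 0 ∨ a = 1) (hb : b = 0 ∨ b = 1)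
    (h : (a : ZMod 2) = (b : ZMod 2)) : a = b := by
  rcases ha with ha | ha <;> rcases hb with hb | hb <;> subst ha <;> subst hb <;>
    first | rfl | (exfalso; revert h; decide)

-- ---- final assembly ----
lemma elementwise (x : List Int) (i : Nat) :
    Yrec x i = PySem.Int.mod ((List.range (i + 1)).foldl
      (fun s k => s + Himp k * PySem.Int.mod (x.getD (i - k) 0) 2) 0) 2 := by
  apply eq_of_cast_eq
  · rw [Yrec]; exact PySem.Int.mod_two_eq _
  · exact PySem.Int.mod_two_eq _
  · rw [cast_mod_two, PySem.List.foldl_add, Y_eq_S]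
    have hsum : ((((List.range (i + 1)).map
        (fun k => Himp k * PySem.Int.mod (x.getD (i - k) 0) 2)).sum : Int) : ZMod 2)
        = ∑ k ∈ Finset.range (i + 1), Hh k * xh x (i - k) := by
      rw [show ((List.range (i + 1)).map
            (fun k => Himp k * PySem.Int.mod (x.getD (i - k) 0) 2)).sum
          = ∑ k ∈ Finset.range (i + 1), Himp k * PySem.Int.mod (x.getD (i - k) 0) 2 from rfl]
      push_cast
      apply Finset.sum_congr rfl
      intro k hk
      rw [cast_mod_two]
      simp [Hh, xh]
    have hrefl : Sh x i = ∑ k ∈ Finset.range (i + 1), Hh k * xh x (i - k) := by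
      rw [← Finset.sum_range_reflect (fun k => Hh k * xh x (i - k)) (i + 1)]
      conv_lhs => rw [Sh]
      apply Finset.sum_congr rfl
      intro j hj
      have hj' : j < i + 1 := Finset.mem_range.1 hj
      have h1 : i + 1 - 1 - j = i - j := by omega
      have h2 : i - (i - j) = j := by omega
      simp only [h1, h2]
    rw [Int.cast_add, Int.cast_zero, zero_add, hsum, hrefl]

theorem scrambler_spec : Claim_equal_scrambler := by
  intro x _
  unfold Spec_scrambler scrambler_alt
  rw [scrambler_eq_Yrec]
  apply List.map_congr_left
  intro i hi
  rw [elementwise x i]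
  congr 1
  apply PySem.List.foldl_congr_mem
  intro acc k hk
  have hk' : k < i + 1 := List.mem_range.1 hk
  rw [scramblerAltH_eq, PySem.List.getD_map_range _ _ _ _ (by
    have := List.mem_range.1 hi; omega)]
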